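-- pv_equiv track=rewrite | github.com/zhaohuanqdcn/AutoRocq | proof-search/agent/context_search.py | _parse_search_entries
-- ===== SOURCE A (Python) =====
-- from typing import List, Dict, Any, Optional, Tuple
--
-- def _parse_search_entries(lines: List[str]) -> List[Dict[str, str]]:
--     """Parse search result lines into structured entries."""
--     entries = []
--     current_entry = {}
--
--     for line in lines:
--         # Check if line is indented BEFORE stripping (indented lines are continuations)
--         is_indented = line.startswith(' ') or line.startswith('\t')
--         line_stripped = line.strip()
--
--         if not line_stripped:
--             if current_entry:
--                 entries.append(current_entry)
--                 current_entry = {}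
--             continue
--
--         # Try to identify theorem/lemma declarations
--         # Common patterns: "name: signature" or "Module.name: signature"
--         # Only lines that are NOT indented and contain ':' start a new entry
--         if ':' in line_stripped and not is_indented:
--             # This looks like a new entry
--             if current_entry:
--                 entries.append(current_entry)
--
--             parts = line_stripped.split(':', 1)
--             name_part = parts[0].strip()
--             signature_part = parts[1].strip() if len(parts) > 1 else ""
--
--             # Extract module if present
--             module = ""
--             if '.' in name_part:
--                 name_parts = name_part.split('.')
--                 if len(name_parts) > 1:
--                     module = '.'.join(name_parts[:-1])
--                     name = name_parts[-1]
--                 else: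
--                     name = name_part
--             else:
--                 name = name_part
--
--             current_entry = {
--                 'name': name,
--                 'full_name': name_part,
--                 'signature': signature_part,
--                 'module': module,
--                 'raw_line': line_stripped
--             }
--         else:
--             # Continuation of current entry (indented lines or lines without ':')
--             if current_entry:
--                 current_entry['signature'] = current_entry.get('signature', '') + ' ' + line_stripped
--
--     # Don't forget the last entry
--     if current_entry:
--         entries.append(current_entry)
--
--     return entries
-- ===== SOURCE B (Python) =====
-- from typing import List, Dict
--
-- def _is_header(line: str) -> bool:
--     return (':' in line.strip()) and not (line.startswith(' ') or line.startswith('\t'))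
--
-- def _block_to_entry(header: str, conts: List[str]) -> Dict[str, str]:
--     parts = header.split(':', 1)
--     name_part = parts[0].strip()
--     sig = parts[1].strip() if len(parts) > 1 else ""
--     if '.' in name_part:
--         np = name_part.split('.')
--         if len(np) > 1:
--             module = '.'.join(np[:-1])
--             name = np[-1]
--         else:
--             module = ""
--             name = name_part
--     else:
--         module = ""
--         name = name_part
--     return {
--         'name': name,
--         'full_name': name_part,
--         'signature': ' '.join([sig] + conts),
--         'module': module,
--         'raw_line': header,
--     }
--
-- def _parse_search_entries(lines: List[str]) -> List[Dict[str, str]]: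
--     """Group lines into header blocks, then parse each block into an entry."""
--     blocks = []
--     i = 0
--     n = len(lines)
--     while i < n:
--         line = lines[i]
--         if _is_header(line):
--             conts = []
--             i += 1
--             while i < n:
--                 nxt = lines[i]
--                 if not nxt.strip() or _is_header(nxt):
--                     break
--                 conts.append(nxt.strip())
--                 i += 1
--             blocks.append((line.strip(), conts))
--         else:
--             i += 1
--     return [_block_to_entry(h, c) for h, c in blocks]
-- ===== Notes on version B (the rewrite author's own statement) =====
-- stated objective: alternative
-- what changed: Replaces A's single fold with a mutable current-entry dict and flush logic by a two-pass decomposition: an index-driven grouping pass that collects (header, continuations) blocks, then a pure per-block parser that builds each entry with ' '.join for the signature.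
import Mathlib
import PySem

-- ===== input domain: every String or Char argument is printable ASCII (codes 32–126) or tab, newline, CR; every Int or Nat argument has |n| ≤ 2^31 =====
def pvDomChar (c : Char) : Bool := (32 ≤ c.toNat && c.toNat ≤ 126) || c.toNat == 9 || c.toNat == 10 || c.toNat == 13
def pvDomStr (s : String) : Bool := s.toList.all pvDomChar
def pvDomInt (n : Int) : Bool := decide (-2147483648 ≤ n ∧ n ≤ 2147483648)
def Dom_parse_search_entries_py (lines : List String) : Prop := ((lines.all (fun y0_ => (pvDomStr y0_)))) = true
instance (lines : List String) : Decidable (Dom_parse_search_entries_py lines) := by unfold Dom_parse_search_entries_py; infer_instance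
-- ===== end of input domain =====

-- B re-parses the same lines by a two-pass decomposition (group header blocks, then map each
-- block to an entry) instead of A's single fold with a mutable current-entry dict; same output.

-- ===== PORT A =====
-- one loop step of A's `for line in lines` (state = (entries, current_entry))
def pvStepA (st : List (PySem.Dict String String) × PySem.Dict String String) (line : String) :
    List (PySem.Dict String String) × PySem.Dict String String :=
  let is_indented := PySem.Str.startswith line " " || PySem.Str.startswith line "\t"
  let ls := PySem.Str.strip line
  if ls = "" then
    if st.2.size ≠ 0 then (st.1 ++ [st.2], PySem.Dict.empty) else st
  else if PySem.Str.isIn ":" ls && !is_indented then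
    let entries := if st.2.size ≠ 0 then st.1 ++ [st.2] else st.1
    let parts := (PySem.Str.splitMax? ls ":" 1).getD []
    let name_part := PySem.Str.strip (parts.getD 0 "")
    let signature_part := if parts.length > 1 then PySem.Str.strip (parts.getD 1 "") else ""
    -- (module, name)
    let mn :=
      if PySem.Str.isIn "." name_part then
        let name_parts := (PySem.Str.split? name_part ".").getD []
        if name_parts.length > 1 then
          (PySem.Str.join "." (PySem.List.slice name_parts none (some (-1))),
           PySem.List.pyGetD name_parts (-1) "")
        else ("", name_part)
      else ("", name_part)
    (entries,
     PySem.Dict.ofList [("name", mn.2), ("full_name", name_part),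
       ("signature", signature_part), ("module", mn.1), ("raw_line", ls)])
  else
    if st.2.size ≠ 0 then
      (st.1, st.2.insert "signature"
        (PySem.Str.join "" [st.2.getD "signature" "", " ", ls]))
    else st

-- the trailing `if current_entry: entries.append(current_entry)` plus list[dict] → items conversion
def pvFinishA (st : List (PySem.Dict String String) × PySem.Dict String String) :
    List (List (String × String)) :=
  (if st.2.size ≠ 0 then st.1 ++ [st.2] else st.1).map PySem.Dict.items

def parse_search_entries_py (lines : List String) : List (List (String × String)) :=
  pvFinishA (lines.foldl pvStepA ([], PySem.Dict.empty))

-- ===== PORT B =====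
def pvHeaderB (line : String) : Bool :=
  PySem.Str.isIn ":" (PySem.Str.strip line) &&
    !(PySem.Str.startswith line " " || PySem.Str.startswith line "\t")

-- the inner `while` of Source B: collect stripped continuation lines until blank/header
def pvTakeContsB : List String → List String × List String
  | [] => ([], [])
  | l :: rest =>
    if PySem.Str.strip l = "" || pvHeaderB l then ([], l :: rest)
    else
      let p := pvTakeContsB rest
      (PySem.Str.strip l :: p.1, p.2)

-- needed by pvBlocksB's termination
theorem pvTakeContsB_len : ∀ ls : List String, (pvTakeContsB ls).2.length ≤ ls.length := by
  intro ls
  induction ls with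
  | nil => simp [pvTakeContsB]
  | cons l rest ih =>
    simp only [pvTakeContsB]
    split
    · simp
    · simpa using Nat.le_succ_of_le ih

-- the outer `while` of Source B: the list of (stripped header, continuations) blocks
def pvBlocksB : List String → List (String × List String)
  | [] => []
  | l :: rest =>
    if pvHeaderB l then
      let p := pvTakeContsB rest
      (PySem.Str.strip l, p.1) :: pvBlocksB p.2
    else pvBlocksB rest
termination_by ls => ls.length
decreasing_by
  · simpa using Nat.lt_succ_of_le (pvTakeContsB_len rest)
  · simp

-- Source B's _block_to_entry
def pvEntryB (h : String) (conts : List String) : PySem.Dict String String :=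
  let parts := (PySem.Str.splitMax? h ":" 1).getD []
  let name_part := PySem.Str.strip (parts.getD 0 "")
  let sig := if parts.length > 1 then PySem.Str.strip (parts.getD 1 "") else ""
  -- (module, name)
  let mn :=
    if PySem.Str.isIn "." name_part then
      let np := (PySem.Str.split? name_part ".").getD []
      if np.length > 1 then
        (PySem.Str.join "." (PySem.List.slice np none (some (-1))),
         PySem.List.pyGetD np (-1) "")
      else ("", name_part)
    else ("", name_part)
  PySem.Dict.ofList [("name", mn.2), ("full_name", name_part),
    ("signature", PySem.Str.join " " (sig :: conts)), ("module", mn.1), ("raw_line", h)]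

def parse_search_entries_py_alt (lines : List String) : List (List (String × String)) :=
  (pvBlocksB lines).map (fun b => (pvEntryB b.1 b.2).items)

-- ===== PRECONDITION & SPEC =====
def Spec_parse_search_entries_py (lines : List String) (out : List (List (String × String))) : Prop := out = parse_search_entries_py_alt lines
instance (lines : List String) (out : List (List (String × String))) : Decidable (Spec_parse_search_entries_py lines out) := by unfold Spec_parse_search_entries_py; infer_instance

-- ===== CLAIM (what is proved, stated in full; the proofs are below) =====
def Claim_equal_parse_search_entries_py : Prop := ∀ (lines : List String), Dom_parse_search_entries_py lines → Spec_parse_search_entries_py lines (parse_search_entries_py lines)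

-- ===== LEMMAS AND PROOFS =====

-- A's `current_entry` during a block: the entry built from header ls with accumulated signature sig
def pvParts (ls : String) : List String := (PySem.Str.splitMax? ls ":" 1).getD []

def pvSig0 (ls : String) : String :=
  if (pvParts ls).length > 1 then PySem.Str.strip ((pvParts ls).getD 1 "") else ""

def pvMN (ls : String) : String × String :=
  let name_part := PySem.Str.strip ((pvParts ls).getD 0 "")
  if PySem.Str.isIn "." name_part then
    let np := (PySem.Str.split? name_part ".").getD []
    if np.length > 1 then
      (PySem.Str.join "." (PySem.List.slice np none (some (-1))),
       PySem.List.pyGetD np (-1) "")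
    else ("", name_part)
  else ("", name_part)

def pvDictA (ls sig : String) : PySem.Dict String String :=
  PySem.Dict.ofList [("name", (pvMN ls).2), ("full_name", PySem.Str.strip ((pvParts ls).getD 0 "")),
    ("signature", sig), ("module", (pvMN ls).1), ("raw_line", ls)]

def pvCat (a b : String) : String := PySem.Str.join "" [a, " ", b]

theorem pvDictA_size (ls sig : String) : (pvDictA ls sig).size = 5 := by
  simp [pvDictA, PySem.Dict.ofList, PySem.Dict.update, PySem.Dict.insert,
    PySem.Dict.contains, PySem.Dict.empty, PySem.Dict.size]

theorem pvDictA_getD_sig (ls sig : String) : (pvDictA ls sig).getD "signature" "" = sig := by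
  simp [pvDictA, PySem.Dict.ofList, PySem.Dict.update, PySem.Dict.insert,
    PySem.Dict.contains, PySem.Dict.empty, PySem.Dict.getD, PySem.Dict.get?]

theorem pvDictA_insert_sig (ls sig v : String) :
    (pvDictA ls sig).insert "signature" v = pvDictA ls v := by
  simp [pvDictA, PySem.Dict.ofList, PySem.Dict.update, PySem.Dict.insert,
    PySem.Dict.contains, PySem.Dict.empty]

theorem pvEntryB_eq_dictA (h : String) (conts : List String) :
    pvEntryB h conts = pvDictA h (PySem.Str.join " " (pvSig0 h :: conts)) := by
  simp [pvEntryB, pvDictA, pvMN, pvSig0, pvParts]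

-- pvStepA, re-expressed with the proof-side helpers (pure unfolding)
theorem pvStepA_eq (es : List (PySem.Dict String String)) (d : PySem.Dict String String) (l : String) :
    pvStepA (es, d) l =
      if PySem.Str.strip l = "" then
        (if d.size ≠ 0 then (es ++ [d], PySem.Dict.empty) else (es, d))
      else if pvHeaderB l then
        ((if d.size ≠ 0 then es ++ [d] else es),
          pvDictA (PySem.Str.strip l) (pvSig0 (PySem.Str.strip l)))
      else
        (if d.size ≠ 0 then
          (es, d.insert "signature"
            (PySem.Str.join "" [d.getD "signature" "", " ", PySem.Str.strip l]))
        else (es, d)) := rfl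

theorem pvStepA_blank {l : String} (hb : PySem.Str.strip l = "")
    (es : List (PySem.Dict String String)) (d : PySem.Dict String String) :
    pvStepA (es, d) l = if d.size ≠ 0 then (es ++ [d], PySem.Dict.empty) else (es, d) := by
  rw [pvStepA_eq]; simp [hb]

theorem pvStepA_header {l : String} (hb : PySem.Str.strip l ≠ "") (hh : pvHeaderB l = true)
    (es : List (PySem.Dict String String)) (d : PySem.Dict String String) :
    pvStepA (es, d) l =
      ((if d.size ≠ 0 then es ++ [d] else es),
        pvDictA (PySem.Str.strip l) (pvSig0 (PySem.Str.strip l))) := by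
  rw [pvStepA_eq]; simp [hb, hh]

theorem pvStepA_cont {l : String} (hb : PySem.Str.strip l ≠ "") (hh : pvHeaderB l = false)
    (es : List (PySem.Dict String String)) (h sig : String) :
    pvStepA (es, pvDictA h sig) l = (es, pvDictA h (pvCat sig (PySem.Str.strip l))) := by
  rw [pvStepA_eq]
  simp [hb, hh, pvDictA_size, pvCat, pvDictA_getD_sig, pvDictA_insert_sig]

theorem pvStepA_cont_empty {l : String} (hb : PySem.Str.strip l ≠ "") (hh : pvHeaderB l = false)
    (es : List (PySem.Dict String String)) :
    pvStepA (es, PySem.Dict.empty) l = (es, PySem.Dict.empty) := by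
  rw [pvStepA_eq]
  simp [hb, hh, PySem.Dict.size_empty]

theorem pvHeaderB_of_blank {l : String} (hb : PySem.Str.strip l = "") : pvHeaderB l = false := by
  have h0 : PySem.Chars.isIn [':'] ([] : List Char) = false := by decide
  simp [pvHeaderB, hb, h0]

-- ' '.join([sig] + conts) equals A's repeated `sig = sig + ' ' + c`
theorem pvJoin_aux (a b : List Char) (L : List (List Char)) :
    PySem.Chars.join [' '] ((a ++ ' ' :: b) :: L) = a ++ ' ' :: PySem.Chars.join [' '] (b :: L) := by
  cases L with
  | nil => simp [PySem.Chars.join_singleton]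
  | cons x xs => simp [PySem.Chars.join_cons_cons]

theorem pvFoldlCat_eq_join : ∀ (conts : List String) (s : String),
    List.foldl pvCat s conts = PySem.Str.join " " (s :: conts) := by
  intro conts
  induction conts with
  | nil =>
    intro s
    apply String.toList_inj.mp
    simp [PySem.Str.toList_join, PySem.Chars.join_singleton]
  | cons c cs ih =>
    intro s
    apply String.toList_inj.mp
    have h1 : (pvCat s c).toList = s.toList ++ ' ' :: c.toList := by
      simp [pvCat, PySem.Str.toList_join, PySem.Chars.join_cons_cons, PySem.Chars.join_singleton]
    calc (List.foldl pvCat s (c :: cs)).toList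
        = (PySem.Str.join " " (pvCat s c :: cs)).toList := by
          simpa using congrArg String.toList (ih (pvCat s c))
      _ = (PySem.Str.join " " (s :: c :: cs)).toList := by
          simp [PySem.Str.toList_join, h1, pvJoin_aux, PySem.Chars.join_cons_cons]

-- the main invariant: part 1 relates A's fold from an empty current_entry to B's blocks;
-- part 2 relates A's fold from a pending entry (header h, signature so far sig) to B's
-- continuation collection
theorem pvMain : ∀ (n : Nat) (lines : List String), lines.length ≤ n →
    (∀ es : List (PySem.Dict String String),
       pvFinishA (lines.foldl pvStepA (es, PySem.Dict.empty)) =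
         es.map PySem.Dict.items ++ (pvBlocksB lines).map (fun b => (pvEntryB b.1 b.2).items))
  ∧ (∀ (es : List (PySem.Dict String String)) (h sig : String),
       pvFinishA (lines.foldl pvStepA (es, pvDictA h sig)) =
         es.map PySem.Dict.items ++
           ((pvDictA h (List.foldl pvCat sig (pvTakeContsB lines).1)).items
             :: (pvBlocksB (pvTakeContsB lines).2).map (fun b => (pvEntryB b.1 b.2).items))) := by
  intro n
  induction n with
  | zero =>
    intro lines hlen
    have : lines = [] := List.eq_nil_of_length_eq_zero (Nat.le_zero.mp hlen)
    subst this
    constructor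
    · intro es
      simp [pvFinishA, pvBlocksB, PySem.Dict.empty, PySem.Dict.size]
    · intro es h sig
      simp [pvFinishA, pvTakeContsB, pvBlocksB, pvDictA_size]
  | succ n ih =>
    intro lines hlen
    cases lines with
    | nil =>
      constructor
      · intro es
        simp [pvFinishA, pvBlocksB, PySem.Dict.empty, PySem.Dict.size]
      · intro es h sig
        simp [pvFinishA, pvTakeContsB, pvBlocksB, pvDictA_size]
    | cons l rest =>
      have hrest : rest.length ≤ n := Nat.le_of_succ_le_succ hlen
      by_cases hb : PySem.Str.strip l = ""
      · -- blank line
        have hh : pvHeaderB l = false := pvHeaderB_of_blank hb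
        have hbl : pvBlocksB (l :: rest) = pvBlocksB rest := by
          rw [pvBlocksB]; simp [hh]
        constructor
        · intro es
          have e1 : pvStepA (es, PySem.Dict.empty) l = (es, PySem.Dict.empty) := by
            rw [pvStepA_blank hb]; simp [PySem.Dict.size_empty]
          rw [List.foldl_cons, e1, (ih rest hrest).1 es, hbl]
        · intro es h sig
          have e2 : pvStepA (es, pvDictA h sig) l = (es ++ [pvDictA h sig], PySem.Dict.empty) := by
            rw [pvStepA_blank hb]; simp [pvDictA_size]
          have ht : pvTakeContsB (l :: rest) = ([], l :: rest) := by
            rw [pvTakeContsB]; simp [hb]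
          rw [List.foldl_cons, e2, (ih rest hrest).1 (es ++ [pvDictA h sig]), ht]
          simp [hbl]
      · by_cases hh : pvHeaderB l = true
        · -- header line
          have hbl : pvBlocksB (l :: rest) =
              (PySem.Str.strip l, (pvTakeContsB rest).1) :: pvBlocksB (pvTakeContsB rest).2 := by
            rw [pvBlocksB]; simp [hh]
          constructor
          · intro es
            have e1 : pvStepA (es, PySem.Dict.empty) l =
                (es, pvDictA (PySem.Str.strip l) (pvSig0 (PySem.Str.strip l))) := by
              rw [pvStepA_header hb hh]; simp [PySem.Dict.size_empty]
            rw [List.foldl_cons, e1,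
              (ih rest hrest).2 es (PySem.Str.strip l) (pvSig0 (PySem.Str.strip l)), hbl]
            simp [pvEntryB_eq_dictA, pvFoldlCat_eq_join]
          · intro es h sig
            have e2 : pvStepA (es, pvDictA h sig) l =
                (es ++ [pvDictA h sig],
                  pvDictA (PySem.Str.strip l) (pvSig0 (PySem.Str.strip l))) := by
              rw [pvStepA_header hb hh]; simp [pvDictA_size]
            have ht : pvTakeContsB (l :: rest) = ([], l :: rest) := by
              rw [pvTakeContsB]; simp [hb, hh]
            rw [List.foldl_cons, e2,
              (ih rest hrest).2 (es ++ [pvDictA h sig]) (PySem.Str.strip l)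
                (pvSig0 (PySem.Str.strip l)), ht, hbl]
            simp [pvEntryB_eq_dictA, pvFoldlCat_eq_join]
        · -- continuation line
          have hh' : pvHeaderB l = false := by revert hh; cases pvHeaderB l <;> simp
          constructor
          · intro es
            have hbl : pvBlocksB (l :: rest) = pvBlocksB rest := by
              rw [pvBlocksB]; simp [hh']
            rw [List.foldl_cons, pvStepA_cont_empty hb hh', (ih rest hrest).1 es, hbl]
          · intro es h sig
            have ht : pvTakeContsB (l :: rest) =
                (PySem.Str.strip l :: (pvTakeContsB rest).1, (pvTakeContsB rest).2) := by
              rw [pvTakeContsB]; simp [hb, hh']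
            rw [List.foldl_cons, pvStepA_cont hb hh',
              (ih rest hrest).2 es h (pvCat sig (PySem.Str.strip l)), ht]
            simp

-- ===== VERDICT (by name: the statement is the Claim_ definition above) =====
theorem parse_search_entries_py_spec : Claim_equal_parse_search_entries_py := by
  intro lines _
  unfold Spec_parse_search_entries_py parse_search_entries_py parse_search_entries_py_alt
  simpa using (pvMain lines.length lines (Nat.le_refl _)).1 []
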